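-- pv_equiv track=rewrite | github.com/pypi-data/pypi-mirror-175 | packages/dictdatabase/dictdatabase-2.1.2.tar.gz/dictdatabase-2.1.2/dictdatabase/utils.py | find_outermost_key_str_index
-- ===== SOURCE A (Python) =====
-- def count_nesting(data: str, start: int, end: int) -> int:
-- 	"""
-- 	Returns the number of nesting levels between the start and end indices.
--
-- 	:param data: The string to be parsed
-- 	"""
-- 	skip_next, in_str, nesting = False, False, 0
--
-- 	for i in range(start, end):
-- 		if skip_next:
-- 			skip_next = False
-- 			continue
-- 		current = data[i]
-- 		if current == "\\":
-- 			skip_next = True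
-- 			continue
-- 		if current == '"':
-- 			in_str = not in_str
-- 		if in_str or current == " ":
-- 			continue
-- 		elif current == "{":
-- 			nesting += 1
-- 		elif current == "}":
-- 			nesting -= 1
-- 	return nesting
--
-- def find_outermost_key_str_index(data: str, key: str):
-- 	"""
-- 		Returns the index of the key that is at the outermost nesting level.
-- 		If the key is not found, return -1.
-- 		If the key you are looking for is `some_key`, then you should pass
-- 		`"some_key":` as the `key` argument to this function.
-- 		Args:
-- 		- `data`: Correct JSON as a string
-- 		- `key`: The key of an object in `data` to search for
-- 	"""
-- 	if (curr_i := data.find(key, 0)) == -1: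
-- 		return -1
--
-- 	key_nest = [(curr_i, 0)]  # (key, nesting)
--
-- 	while (next_i := data.find(key, curr_i + len(key))) != -1:
-- 		nesting = count_nesting(data, curr_i + len(key), next_i)
-- 		key_nest.append((next_i, nesting))
-- 		curr_i = next_i
--
-- 	# Early exit if there is only one key
-- 	if len(key_nest) == 1:
-- 		return key_nest[0][0]
--
-- 	# Relative to total nesting
-- 	for i in range(1, len(key_nest)):
-- 		key_nest[i] = (key_nest[i][0], key_nest[i - 1][1] + key_nest[i][1])
-- 	return min(key_nest, key=lambda x: x[1])[0]
-- ===== SOURCE B (Python) =====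
-- def find_outermost_key_str_index(data: str, key: str):
-- 	"""
-- 	One linear scan over data: maintain brace depth, string and escape state;
-- 	at each position test whether key starts there (as a raw substring, like
-- 	str.find).  On a match, record (index, depth) if strictly shallower than
-- 	the best so far, reset the string/escape state and jump past the key text.
-- 	Returns -1 if the key does not occur.
-- 	"""
-- 	n, L = len(data), len(key)
-- 	i = 0
-- 	depth = 0
-- 	in_str = False
-- 	skip = False
-- 	best_i = -1
-- 	best_d = 0
-- 	while i < n:
-- 		if data.startswith(key, i):
-- 			if best_i == -1 or depth < best_d:
-- 				best_i, best_d = i, depth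
-- 			in_str = False
-- 			skip = False
-- 			i += L
-- 			continue
-- 		c = data[i]
-- 		if skip:
-- 			skip = False
-- 		elif c == "\\":
-- 			skip = True
-- 		elif c == '"':
-- 			in_str = not in_str
-- 		elif not in_str:
-- 			if c == "{":
-- 				depth += 1
-- 			elif c == "}":
-- 				depth -= 1
-- 		i += 1
-- 	return best_i
-- ===== Notes on version B (the rewrite author's own statement) =====
-- stated objective: alternative
-- what changed: A's repeated str.find loop + per-gap count_nesting + list accumulation + prefix-sum pass + min(key=...) is replaced by one linear scan over data that maintains the brace/string/escape state and the running best (shallowest, earliest) occurrence online, resetting the string state and jumping past the key text at each match.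
import Mathlib
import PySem

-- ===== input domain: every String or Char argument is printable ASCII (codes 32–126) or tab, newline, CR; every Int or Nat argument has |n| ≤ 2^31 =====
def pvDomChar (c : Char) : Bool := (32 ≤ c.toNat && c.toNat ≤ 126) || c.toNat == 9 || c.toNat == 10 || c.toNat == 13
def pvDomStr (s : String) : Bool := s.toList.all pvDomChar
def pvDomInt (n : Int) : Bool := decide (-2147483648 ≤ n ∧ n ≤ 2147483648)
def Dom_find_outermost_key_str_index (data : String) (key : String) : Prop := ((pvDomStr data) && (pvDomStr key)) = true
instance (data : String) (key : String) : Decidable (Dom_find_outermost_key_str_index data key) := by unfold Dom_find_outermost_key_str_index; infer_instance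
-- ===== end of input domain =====

-- B replaces A's repeated str.find + per-gap count_nesting + list/min pass by ONE linear scan
-- that maintains the nesting state and the best (shallowest, earliest) match online (objective:
-- alternative single-pass decomposition; same asymptotic cost).

-- ===== PORT A =====

-- step of count_nesting's for-body: state = (skip_next, in_str, nesting), current = data[i]
def pvCnStep (st : Bool × Bool × Int) (current : Char) : Bool × Bool × Int :=
  if st.1 then (false, st.2.1, st.2.2)
  else if current = '\\' then (true, st.2.1, st.2.2)
  else
    let in_str := if current = '"' then !st.2.1 else st.2.1
    if in_str || current = ' ' then (false, in_str, st.2.2)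
    else if current = '{' then (false, in_str, st.2.2 + 1)
    else if current = '}' then (false, in_str, st.2.2 - 1)
    else (false, in_str, st.2.2)

-- count_nesting(data, start, end): data[i] via pyGetD — every call site keeps i inside the string
def pvCountNesting (data : String) (start : Int) (end_ : Int) : Int :=
  ((PySem.List.pyRange start end_ 1).foldl
    (fun st i => pvCnStep st (PySem.List.pyGetD data.toList i ' '))
    (false, false, 0)).2.2

-- the while-loop of A; fuel: each iteration advances curr_i by ≥ len(key) ≥ 1 (key ≠ "" by Pre_)
def pvFindLoop (data key : String) (fuel : Nat) (curr_i : Int) (key_nest : List (Int × Int)) :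
    List (Int × Int) :=
  match fuel with
  | 0 => key_nest
  | fuel + 1 =>
    let next_i := PySem.Str.findFrom data key (curr_i + PySem.Str.len key)
    if next_i = -1 then key_nest
    else pvFindLoop data key fuel next_i
      (key_nest ++ [(next_i, pvCountNesting data (curr_i + PySem.Str.len key) next_i)])

def find_outermost_key_str_index (data : String) (key : String) : Int :=
  let curr_i := PySem.Str.find data key
  if curr_i = -1 then -1
  else
    let key_nest := pvFindLoop data key (data.toList.length + 1) curr_i [(curr_i, 0)]
    if key_nest.length = 1 then (PySem.List.pyGetD key_nest 0 (0, 0)).1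
    else
      let key_nest2 := (PySem.List.pyRange 1 (key_nest.length : Int) 1).foldl
        (fun kn i =>
          PySem.List.pySetD kn i
            ((PySem.List.pyGetD kn i (0, 0)).1,
             (PySem.List.pyGetD kn (i - 1) (0, 0)).2 + (PySem.List.pyGetD kn i (0, 0)).2))
        key_nest
      match PySem.List.min? key_nest2 (fun x => x.2) with
      | some m => m.1
      | none => -1   -- unreachable: key_nest2 is nonempty

-- ===== PORT B =====

-- one character step of B's scan: state = (skip, in_str, depth)
def pvScanStep (st : Bool × Bool × Int) (c : Char) : Bool × Bool × Int :=
  if st.1 then (false, st.2.1, st.2.2)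
  else if c = '\\' then (true, st.2.1, st.2.2)
  else if c = '"' then (false, !st.2.1, st.2.2)
  else if !st.2.1 then
    if c = '{' then (false, st.2.1, st.2.2 + 1)
    else if c = '}' then (false, st.2.1, st.2.2 - 1)
    else (false, st.2.1, st.2.2)
  else (false, st.2.1, st.2.2)

-- B's while-loop; data.startswith(key, i) is key.toList <+: cs.drop i (PySem.Chars.startswith);
-- fuel: every iteration advances i by ≥ 1 once key ≠ "" (Pre_)
def pvScanLoop (cs kl : List Char) (fuel : Nat) (i : Nat) (st : Bool × Bool × Int)
    (best_i best_d : Int) : Int :=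
  match fuel with
  | 0 => best_i
  | fuel + 1 =>
    if i < cs.length then
      if PySem.Chars.startswith (cs.drop i) kl then
        let best := if best_i = -1 || st.2.2 < best_d then ((i : Int), st.2.2) else (best_i, best_d)
        pvScanLoop cs kl fuel (i + kl.length) (false, false, st.2.2) best.1 best.2
      else
        pvScanLoop cs kl fuel (i + 1) (pvScanStep st (cs.getD i ' ')) best_i best_d
    else best_i

def find_outermost_key_str_index_alt (data : String) (key : String) : Int :=
  pvScanLoop data.toList key.toList (data.toList.length + 1) 0 (false, false, 0) (-1) 0

-- ===== PRECONDITION & SPEC =====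

-- Pre_ excludes only key = "": there A's while-loop (data.find("", i) = i forever) never
-- terminates, so A returns on exactly the inputs with key ≠ "".
def Pre_find_outermost_key_str_index (data : String) (key : String) : Prop := key ≠ ""
instance (data : String) (key : String) : Decidable (Pre_find_outermost_key_str_index data key) := by
  unfold Pre_find_outermost_key_str_index; infer_instance

def pvWitness_find_outermost_key_str_index : String × String :=
  ("{\"a\": 1, \"b\": {\"a\": 2}}", "\"a\":")

def Spec_find_outermost_key_str_index (data : String) (key : String) (out : Int) : Prop :=
  out = find_outermost_key_str_index_alt data key
instance (data : String) (key : String) (out : Int) :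
    Decidable (Spec_find_outermost_key_str_index data key out) := by
  unfold Spec_find_outermost_key_str_index; infer_instance

-- ===== CLAIM (what is proved, stated in full; the proofs are below) =====
def Claim_equal_find_outermost_key_str_index : Prop :=
  ∀ (data : String) (key : String), Dom_find_outermost_key_str_index data key →
    Pre_find_outermost_key_str_index data key →
    Spec_find_outermost_key_str_index data key (find_outermost_key_str_index data key)

-- ===== LEMMAS AND PROOFS =====

-- the two per-character steps compute the same state
theorem pvStep_eq (st : Bool × Bool × Int) (c : Char) : pvScanStep st c = pvCnStep st c := by
  obtain ⟨sk, is, z⟩ := st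
  simp only [pvScanStep, pvCnStep]
  by_cases hsk : sk <;> by_cases h1 : c = '\\' <;> by_cases h2 : c = '"' <;>
    by_cases h3 : c = '{' <;> by_cases h4 : c = '}' <;> by_cases h5 : c = ' ' <;>
    cases is <;> simp_all

-- nesting component of a fold of pvScanStep is additive in its start value
theorem pvScanStep_shift (sk is : Bool) (z : Int) (c : Char) :
    pvScanStep (sk, is, z) c
      = ((pvScanStep (sk, is, 0) c).1, (pvScanStep (sk, is, 0) c).2.1,
         z + (pvScanStep (sk, is, 0) c).2.2) := by
  simp only [pvScanStep]
  by_cases hsk : sk <;> by_cases h1 : c = '\\' <;> by_cases h2 : c = '"' <;>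
    by_cases h3 : c = '{' <;> by_cases h4 : c = '}' <;> cases is <;> simp_all <;> ring

theorem pvFold_shift (l : List Char) : ∀ (sk is : Bool) (z : Int),
    l.foldl pvScanStep (sk, is, z)
      = ((l.foldl pvScanStep (sk, is, 0)).1, (l.foldl pvScanStep (sk, is, 0)).2.1,
         z + (l.foldl pvScanStep (sk, is, 0)).2.2) := by
  induction l with
  | nil => intro sk is z; simp
  | cons c t ih =>
    intro sk is z
    simp only [List.foldl_cons]
    rw [pvScanStep_shift]
    obtain ⟨sk', is', d⟩ := pvScanStep (sk, is, 0) c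
    rw [ih sk' is' (z + d), ih sk' is' d]
    simp; ring

-- count_nesting's range-fold over [a, a+d) is the fold of its step over the corresponding slice
theorem pvRangeFold_eq (cs : List Char) :
    ∀ (d a : Nat) (st : Bool × Bool × Int), a + d ≤ cs.length →
    (PySem.List.pyRange (a : Int) ((a : Int) + (d : Int)) 1).foldl
        (fun st i => pvCnStep st (PySem.List.pyGetD cs i ' ')) st
      = ((cs.drop a).take d).foldl pvCnStep st := by
  intro d
  induction d with
  | zero =>
    intro a st h
    rw [PySem.List.pyRange_one_eq_nil (by omega)]
    simp
  | succ d ih =>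
    intro a st h
    rw [PySem.List.pyRange_one_cons (by omega)]
    have ha : a < cs.length := by omega
    have hdrop : cs.drop a = cs[a] :: cs.drop (a + 1) := List.drop_eq_getElem_cons ha
    rw [hdrop]
    simp only [List.take_succ_cons, List.foldl_cons]
    have hget : PySem.List.pyGetD cs (a : Int) ' ' = cs[a] := by
      rw [PySem.List.pyGetD_natCast]
      exact List.getD_eq_getElem cs ' ' ha
    rw [hget]
    have harith : (a : Int) + 1 = ((a + 1 : Nat) : Int) := by push_cast; ring
    have harith2 : (a : Int) + ((d + 1 : Nat) : Int) = ((a + 1 : Nat) : Int) + (d : Int) := by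
      push_cast; ring
    rw [harith2, harith]
    exact ih (a + 1) _ (by omega)

-- findFrom at a start past the end is -1
theorem pvFindFrom_gt (cs kl : List Char) (p : Nat) (hp : cs.length < p) :
    PySem.Chars.findFrom cs kl (p : Int) = -1 := by
  simp only [PySem.Chars.findFrom]
  have h1 : ¬ ((p : Int) < 0) := by omega
  rw [if_neg h1, if_pos (by exact_mod_cast hp)]

-- one combined case analysis of findFrom at a Nat start
theorem pvFindFrom_cases (cs kl : List Char) (hK : kl ≠ []) (p : Nat) (hp : p ≤ cs.length) :
    (PySem.Chars.findFrom cs kl (p : Int) = -1 ∧ ∀ j, p ≤ j → ¬ kl <+: cs.drop j) ∨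
    (∃ o : Nat, PySem.Chars.findFrom cs kl (p : Int) = (o : Int) ∧ p ≤ o ∧
      o + kl.length ≤ cs.length ∧ kl <+: cs.drop o ∧
      ∀ j, p ≤ j → j < o → ¬ kl <+: cs.drop j) := by
  by_cases hr : PySem.Chars.findFrom cs kl (p : Int) = -1
  · left
    refine ⟨hr, fun j hj hpre => ?_⟩
    have hinf : kl <:+: cs.drop p := by
      have hsuf : cs.drop j <:+ cs.drop p := by
        have : List.drop (j - p) (List.drop p cs) = List.drop j cs := by
          rw [List.drop_drop]; congr 1; omega
        rw [← this]; exact List.drop_suffix _ _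
      exact hpre.isInfix.trans hsuf.isInfix
    rw [PySem.Chars.findFrom_natCast_eq_neg_one_iff cs kl p hp] at hr
    exact hr hinf
  · right
    obtain ⟨hle, hpre, hmin⟩ := PySem.Chars.findFrom_natCast_spec cs kl p hp hr
    set r := PySem.Chars.findFrom cs kl (p : Int) with hrdef
    have h0 : 0 ≤ r := le_trans (by exact_mod_cast Nat.zero_le p) hle
    refine ⟨r.toNat, (Int.toNat_of_nonneg h0).symm, by omega, ?_, hpre, hmin⟩
    have hlen := hpre.length_le
    rw [List.length_drop] at hlen
    have hKpos : 0 < kl.length := List.length_pos_iff.mpr hK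
    omega

-- the chain of greedy occurrences of kl in cs starting at p (proof-side; fuel-indexed)
def pvChain (cs kl : List Char) (fuel : Nat) (p : Nat) : List Nat :=
  match fuel with
  | 0 => []
  | fuel + 1 =>
    let r := PySem.Chars.findFrom cs kl (p : Int)
    if r = -1 then [] else r.toNat :: pvChain cs kl fuel (r.toNat + kl.length)

theorem pvChain_succ (cs kl : List Char) (f p : Nat) :
    pvChain cs kl (f + 1) p
      = (let r := PySem.Chars.findFrom cs kl (p : Int);
         if r = -1 then [] else r.toNat :: pvChain cs kl f (r.toNat + kl.length)) := rfl

theorem pvChain_big (cs kl : List Char) (fuel p : Nat) (hp : cs.length < p) :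
    pvChain cs kl fuel p = [] := by
  cases fuel with
  | zero => rfl
  | succ f => simp [pvChain, pvFindFrom_gt cs kl p hp]

theorem pvChain_irrel (cs kl : List Char) (hK : kl ≠ []) :
    ∀ (fuel1 fuel2 p : Nat), cs.length + 1 ≤ p + fuel1 → cs.length + 1 ≤ p + fuel2 →
      pvChain cs kl fuel1 p = pvChain cs kl fuel2 p := by
  intro fuel1
  induction fuel1 with
  | zero =>
    intro fuel2 p h1 h2
    rw [pvChain_big cs kl fuel2 p (by omega)]
    rfl
  | succ f1 ih =>
    intro fuel2 p h1 h2
    by_cases hp : p ≤ cs.length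
    case neg =>
      rw [pvChain_big cs kl _ p (by omega), pvChain_big cs kl _ p (by omega)]
    cases fuel2 with
    | zero => rw [pvChain_big cs kl _ p (by omega)]; rfl
    | succ f2 =>
      simp only [pvChain]
      by_cases hr : PySem.Chars.findFrom cs kl (p : Int) = -1
      · simp [hr]
      · rw [if_neg hr, if_neg hr]
        have h0 : (0:Int) ≤ PySem.Chars.findFrom cs kl (p : Int) := by
          rcases Int.lt_or_le (PySem.Chars.findFrom cs kl (p : Int)) 0 with h | h
          · exfalso
            have := PySem.Chars.findFrom_natCast_spec cs kl p hp hr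
            omega
          · exact h
        have hle : (p : Int) ≤ PySem.Chars.findFrom cs kl (p : Int) :=
          (PySem.Chars.findFrom_natCast_spec cs kl p hp hr).1
        have hKpos : 0 < kl.length := List.length_pos_iff.mpr hK
        congr 1
        exact ih f2 _ (by omega) (by omega)

-- raw (index, per-gap nesting) pairs A accumulates, along a chain with previous occurrence prev
def pvRaw (data : String) (K : Nat) : Nat → List Nat → List (Int × Int)
  | _, [] => []
  | prev, o :: rest =>
    ((o : Int), pvCountNesting data ((prev + K : Nat) : Int) (o : Int)) :: pvRaw data K o rest

-- cumulative (prefix-summed) version of a raw list, starting from accumulated nesting c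
def pvCum (c : Int) : List (Int × Int) → List (Int × Int)
  | [] => []
  | (o, g) :: t => (o, c + g) :: pvCum (c + g) t

-- annotated occurrences as B sees them: scan restarts at s with accumulated depth c
def pvAnnB (data : String) (K : Nat) : Nat → Int → List Nat → List (Int × Int)
  | _, _, [] => []
  | s, c, o :: rest =>
    ((o : Int), c + pvCountNesting data (s : Int) (o : Int)) ::
      pvAnnB data K (o + K) (c + pvCountNesting data (s : Int) (o : Int)) rest

-- B's best-update step
def pvBest (b : Int × Int) (x : Int × Int) : Int × Int :=
  if b.1 = -1 || x.2 < b.2 then x else b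

-- A's while-loop yields the raw pairs along the chain (lockstep in fuel)
theorem pvFindLoop_eq (data key : String) (cs kl : List Char)
    (hcs : data.toList = cs) (hkl : key.toList = kl) (hK : kl ≠ []) :
    ∀ (fuel : Nat) (p : Nat) (acc : List (Int × Int)),
      pvFindLoop data key fuel (p : Int) acc
        = acc ++ pvRaw data kl.length p (pvChain cs kl fuel (p + kl.length)) := by
  intro fuel
  induction fuel with
  | zero => intro p acc; simp [pvFindLoop, pvChain, pvRaw]
  | succ fuel ih =>
    intro p acc
    simp only [pvFindLoop, pvChain, PySem.Str.findFrom_eq, PySem.Str.len_eq, hcs, hkl]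
    have hcast : (p : Int) + (kl.length : Int) = ((p + kl.length : Nat) : Int) := by push_cast; ring
    rw [hcast]
    by_cases hr : PySem.Chars.findFrom cs kl ((p + kl.length : Nat) : Int) = -1
    · rw [if_pos hr, if_pos hr]
      simp [pvRaw]
    · rw [if_neg hr, if_neg hr]
      have hp : p + kl.length ≤ cs.length := by
        by_contra hgt
        exact hr (pvFindFrom_gt cs kl _ (by omega))
      rcases pvFindFrom_cases cs kl hK (p + kl.length) hp with ⟨h1, _⟩ | ⟨o, ho, hpo, hoK, _, _⟩
      · exact absurd h1 hr
      · rw [ho]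
        have htn : ((o : Int)).toNat = o := Int.toNat_natCast o
        rw [htn, ih o]
        simp only [pvRaw, List.append_assoc, List.cons_append, List.nil_append]

-- the in-place prefix-sum loop turns the raw list into the cumulative list
theorem pvCumLoop_eq (raw : List (Int × Int)) :
    ∀ (pre : List (Int × Int)) (lastp : Int × Int), pre.getLast? = some lastp →
      (PySem.List.pyRange (pre.length : Int) ((pre.length : Int) + (raw.length : Int)) 1).foldl
        (fun kn i =>
          PySem.List.pySetD kn i
            ((PySem.List.pyGetD kn i (0, 0)).1,
             (PySem.List.pyGetD kn (i - 1) (0, 0)).2 + (PySem.List.pyGetD kn i (0, 0)).2))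
        (pre ++ raw)
        = pre ++ pvCum lastp.2 raw := by
  induction raw with
  | nil =>
    intro pre lastp _
    rw [show ((([] : List (Int × Int)).length : Int)) = (0:Int) by simp]
    rw [PySem.List.pyRange_one_eq_nil (by omega)]
    simp [pvCum]
  | cons x t ih =>
    intro pre lastp hlast
    obtain ⟨o, g⟩ := x
    have hpre : pre ≠ [] := by rintro rfl; simp at hlast
    have hL : 1 ≤ pre.length := List.length_pos_iff.mpr hpre
    rw [PySem.List.pyRange_one_cons (by push_cast [List.length_cons]; omega)]
    simp only [List.foldl_cons]
    -- compute the updated list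
    have hget : PySem.List.pyGetD (pre ++ (o, g) :: t) (pre.length : Int) (0, 0) = (o, g) := by
      rw [PySem.List.pyGetD_natCast, List.getD_eq_getElem _ _ (by simp)]
      rw [List.getElem_append_right (le_refl pre.length)]
      simp
    have hget2 : PySem.List.pyGetD (pre ++ (o, g) :: t) ((pre.length : Int) - 1) (0, 0) = lastp := by
      rw [show (pre.length : Int) - 1 = ((pre.length - 1 : Nat) : Int) by omega]
      rw [PySem.List.pyGetD_natCast, List.getD_eq_getElem _ _ (by simp; omega)]
      rw [List.getElem_append_left (by omega)]
      rw [List.getLast?_eq_getElem?, List.getElem?_eq_getElem (by omega)] at hlast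
      simpa using hlast
    have hset : PySem.List.pySetD (pre ++ (o, g) :: t) (pre.length : Int) (o, lastp.2 + g)
        = pre ++ (o, lastp.2 + g) :: t := by
      rw [PySem.List.pySetD_natCast, List.set_append, if_neg (by omega)]
      simp
    rw [hget, hget2, hset]
    have hre : pre ++ (o, lastp.2 + g) :: t = (pre ++ [(o, lastp.2 + g)]) ++ t := by simp
    rw [hre]
    have hlen : ((pre ++ [(o, lastp.2 + g)]).length : Int) = (pre.length : Int) + 1 := by simp
    have hb : (pre.length : Int) + ((((o, g) :: t).length : Nat) : Int)
        = ((pre ++ [(o, lastp.2 + g)]).length : Int) + ((t.length : Nat) : Int) := by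
      simp; ring
    rw [hb, ← hlen]
    rw [ih (pre ++ [(o, lastp.2 + g)]) (o, lastp.2 + g) List.getLast?_concat]
    simp [pvCum]


theorem pvScan_noMatch (cs kl : List Char) :
    ∀ (fuel a : Nat) (st : Bool × Bool × Int) (bi bd : Int),
      (∀ j, a ≤ j → ¬ kl <+: cs.drop j) →
      pvScanLoop cs kl fuel a st bi bd = bi := by
  intro fuel
  induction fuel with
  | zero => intro a st bi bd h; rfl
  | succ fuel ih =>
    intro a st bi bd h
    simp only [pvScanLoop]
    by_cases ha : a < cs.length
    · rw [if_pos ha]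
      have hsw : PySem.Chars.startswith (cs.drop a) kl = false := by
        rw [← Bool.not_eq_true, PySem.Chars.startswith_iff]
        exact h a le_rfl
      rw [hsw]
      simp only [Bool.false_eq_true, if_false]
      exact ih (a + 1) _ bi bd (fun j hj => h j (by omega))
    · rw [if_neg ha]

theorem pvScan_seg (cs kl : List Char) :
    ∀ (d fuel a : Nat) (st : Bool × Bool × Int) (bi bd : Int), a + d ≤ cs.length →
      (∀ j, a ≤ j → j < a + d → ¬ kl <+: cs.drop j) →
      pvScanLoop cs kl (fuel + d) a st bi bd
        = pvScanLoop cs kl fuel (a + d) (((cs.drop a).take d).foldl pvScanStep st) bi bd := by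
  intro d
  induction d with
  | zero => intro fuel a st bi bd _ _; simp
  | succ d ih =>
    intro fuel a st bi bd hle h
    have ha : a < cs.length := by omega
    show pvScanLoop cs kl ((fuel + d) + 1) a st bi bd = _
    simp only [pvScanLoop]
    rw [if_pos ha]
    have hsw : PySem.Chars.startswith (cs.drop a) kl = false := by
      rw [← Bool.not_eq_true, PySem.Chars.startswith_iff]
      exact h a le_rfl (by omega)
    rw [hsw]
    simp only [Bool.false_eq_true, if_false]
    rw [ih fuel (a + 1) _ bi bd (by omega) (fun j hj1 hj2 => h j (by omega) (by omega))]
    have hdrop : cs.drop a = cs[a] :: cs.drop (a + 1) := List.drop_eq_getElem_cons ha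
    rw [hdrop]
    simp only [List.take_succ_cons, List.foldl_cons]
    rw [List.getD_eq_getElem cs ' ' ha]
    congr 1
    omega

-- B's scan, entered at p with fresh string/escape state, folds pvBest over the annotated chain
theorem pvScanLoop_eq (data key : String) (cs kl : List Char)
    (hcs : data.toList = cs) (hkl : key.toList = kl) (hK : kl ≠ []) :
    ∀ (fuel p : Nat) (depth bi bd : Int), cs.length + 1 ≤ p + fuel → p ≤ cs.length →
      pvScanLoop cs kl fuel p (false, false, depth) bi bd
        = ((pvAnnB data kl.length p depth (pvChain cs kl (cs.length + 1 - p) p)).foldl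
            pvBest (bi, bd)).1 := by
  intro fuel
  induction fuel using Nat.strong_induction_on with
  | _ fuel ih =>
    intro p depth bi bd h1 h2
    have hKpos : 0 < kl.length := List.length_pos_iff.mpr hK
    rw [show cs.length + 1 - p = (cs.length - p) + 1 by omega]
    simp only [pvChain]
    rcases pvFindFrom_cases cs kl hK p h2 with ⟨hr, hnone⟩ | ⟨o, ho, hpo, hoK, hopre, homin⟩
    · rw [if_pos hr]
      simp only [pvAnnB, List.foldl_nil]
      exact pvScan_noMatch cs kl fuel p _ bi bd hnone
    · rw [ho]
      rw [if_neg (by omega)]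
      rw [Int.toNat_natCast]
      -- march through the gap [p, o)
      have hfuel : fuel = (fuel - (o - p)) + (o - p) := by omega
      rw [hfuel, pvScan_seg cs kl (o - p) _ p _ bi bd (by omega)
        (fun j hj1 hj2 => homin j hj1 (by omega))]
      rw [show p + (o - p) = o by omega]
      -- the accumulated state: depth grows by exactly count_nesting(data, p, o)
      have hcount : pvCountNesting data (p : Int) (o : Int)
          = (((cs.drop p).take (o - p)).foldl pvScanStep (false, false, 0)).2.2 := by
        unfold pvCountNesting
        rw [hcs, show (o : Int) = (p : Int) + ((o - p : Nat) : Int) by omega]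
        rw [pvRangeFold_eq cs (o - p) p _ (by omega)]
        have hfn : pvCnStep = pvScanStep := by
          funext st c; exact (pvStep_eq st c).symm
        rw [hfn]
      have hstate : ((cs.drop p).take (o - p)).foldl pvScanStep (false, false, depth)
          = ((((cs.drop p).take (o - p)).foldl pvScanStep (false, false, 0)).1,
             (((cs.drop p).take (o - p)).foldl pvScanStep (false, false, 0)).2.1,
             depth + pvCountNesting data (p : Int) (o : Int)) := by
        rw [hcount]; exact pvFold_shift _ false false depth
      rw [hstate]
      -- one matching step at o
      have hf1 : 1 ≤ fuel - (o - p) := by omega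
      rw [show fuel - (o - p) = (fuel - (o - p) - 1) + 1 by omega]
      simp only [pvScanLoop]
      rw [if_pos (by omega)]
      rw [(PySem.Chars.startswith_iff (cs.drop o) kl).mpr hopre]
      simp only [if_true]
      -- recurse after the key text
      rw [ih (fuel - (o - p) - 1) (by omega) (o + kl.length)
        (depth + pvCountNesting data (p : Int) (o : Int)) _ _ (by omega) (by omega)]
      -- identify the chain tails and fold starts
      rw [pvChain_irrel cs kl hK (cs.length - p) (cs.length + 1 - (o + kl.length))
        (o + kl.length) (by omega) (by omega)]
      simp only [pvAnnB, List.foldl_cons, pvBest]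

-- pvAnnB along a chain continued after prev is the shifted cumulative of the raw pairs
theorem pvAnnB_eq_cum (data : String) (K : Nat) :
    ∀ (ch : List Nat) (prev : Nat) (c : Int),
      pvAnnB data K (prev + K) c ch = pvCum c (pvRaw data K prev ch) := by
  intro ch
  induction ch with
  | nil => intro prev c; rfl
  | cons o t ih =>
    intro prev c
    simp only [pvAnnB, pvRaw, pvCum]
    exact congrArg (List.cons _) (ih o _)

theorem pvCum_shift (P : Int) : ∀ (l : List (Int × Int)) (c : Int),
    pvCum (c + P) l = (pvCum c l).map (fun x => (x.1, x.2 + P)) := by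
  intro l
  induction l with
  | nil => intro c; rfl
  | cons x t ih =>
    intro c
    obtain ⟨o, g⟩ := x
    simp only [pvCum, List.map_cons]
    rw [show c + P + g = (c + g) + P by ring, ih (c + g)]

-- folding pvBest from a real (non-sentinel) start is Python's min(key=snd)
theorem pvBest_eq_min (l : List (Int × Int)) : ∀ (b : Int × Int), 0 ≤ b.1 →
    (∀ x ∈ l, 0 ≤ x.1) →
    PySem.List.min? (b :: l) (fun x => x.2) = some (l.foldl pvBest b) := by
  induction l with
  | nil => intro b _ _; rfl
  | cons x t ih =>
    intro b hb hl
    have hx : 0 ≤ x.1 := hl x (by simp)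
    have hb1 : ¬ b.1 = -1 := by omega
    have hstep : pvBest b x = if x.2 < b.2 then x else b := by
      simp [pvBest, hb1]
    have hmin : PySem.List.min? (b :: x :: t) (fun y => y.2)
        = PySem.List.min? (pvBest b x :: t) (fun y => y.2) := by
      simp only [PySem.List.min?, List.foldl_cons, hstep]
      split <;> rfl
    rw [hmin, ih (pvBest b x) (by rw [hstep]; split <;> omega)
      (fun y hy => hl y (by simp [hy]))]
    simp [List.foldl_cons]

-- min(key=snd) is invariant under a uniform shift of snd
theorem pvMin_shift (P : Int) (l : List (Int × Int)) :
    PySem.List.min? (l.map (fun x => (x.1, x.2 + P))) (fun x => x.2)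
      = (PySem.List.min? l (fun x => x.2)).map (fun x => (x.1, x.2 + P)) := by
  have step : ∀ (b x : Int × Int) (t : List (Int × Int)),
      PySem.List.min? (b :: x :: t) (fun y => y.2)
        = PySem.List.min? ((if x.2 < b.2 then x else b) :: t) (fun y => y.2) := by
    intro b x t
    simp only [PySem.List.min?, List.foldl_cons]
    split <;> rfl
  have main : ∀ (t : List (Int × Int)) (b : Int × Int),
      PySem.List.min? ((b :: t).map (fun x => (x.1, x.2 + P))) (fun y => y.2)
        = (PySem.List.min? (b :: t) (fun y => y.2)).map (fun x => (x.1, x.2 + P)) := by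
    intro t
    induction t with
    | nil =>
      intro b
      simp [PySem.List.min?]
    | cons x t ih =>
      intro b
      simp only [List.map_cons] at *
      rw [step, step]
      have hc : ((x.2 + P < b.2 + P)) ↔ (x.2 < b.2) := by omega
      by_cases h : x.2 < b.2
      · rw [if_pos (hc.2 h), if_pos h]
        simpa using ih x
      · rw [if_neg (fun hh => h (hc.1 hh)), if_neg h]
        simpa using ih b
  cases l with
  | nil => rfl
  | cons b t => exact main t b
-- every index in a cumulative raw list is a Nat cast, hence nonnegative
theorem pvCumRaw_fst_nonneg (data : String) (K : Nat) :
    ∀ (ch : List Nat) (prev : Nat) (c : Int) (x : Int × Int),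
      x ∈ pvCum c (pvRaw data K prev ch) → 0 ≤ x.1 := by
  intro ch
  induction ch with
  | nil => intro prev c x hx; simp [pvRaw, pvCum] at hx
  | cons o t ih =>
    intro prev c x hx
    simp only [pvRaw, pvCum, List.mem_cons] at hx
    rcases hx with rfl | hx
    · simp
    · exact ih o _ x hx

-- ===== VERDICT (by name: the statement is the Claim_ definition above) =====
theorem find_outermost_key_str_index_spec : Claim_equal_find_outermost_key_str_index := by
  intro data key _ hkey
  unfold Spec_find_outermost_key_str_index
  have hK : key.toList ≠ [] := fun hh => hkey (String.toList_inj.mp (by simpa using hh))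
  have hKpos : 0 < key.toList.length := List.length_pos_iff.mpr hK
  -- B's scan as a best-fold over the annotated occurrence chain
  unfold find_outermost_key_str_index_alt
  rw [pvScanLoop_eq data key data.toList key.toList rfl rfl hK (data.toList.length + 1) 0
    0 (-1) 0 (by omega) (by omega)]
  rw [show data.toList.length + 1 - 0 = data.toList.length + 1 by omega]
  -- A's find as findFrom at 0
  unfold find_outermost_key_str_index
  rw [PySem.Str.find_eq]
  have hfind : PySem.Chars.find data.toList key.toList
      = PySem.Chars.findFrom data.toList key.toList ((0 : Nat) : Int) := by
    rw [show ((0 : Nat) : Int) = (0 : Int) by simp, PySem.Chars.findFrom_zero]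
  rcases pvFindFrom_cases data.toList key.toList hK 0 (by omega)
    with ⟨hr, _⟩ | ⟨o, ho, _, hoK, hopre, _⟩
  · -- no occurrence at all: both sides are -1
    have hr' : PySem.Chars.find data.toList key.toList = -1 := by rw [hfind, hr]
    rw [hr', if_pos rfl, pvChain_succ]
    simp [hr', pvAnnB]
  · -- at least one occurrence, at index o
    have ho' : PySem.Chars.find data.toList key.toList = ((o : Nat) : Int) := by rw [hfind, ho]
    rw [ho', if_neg (show ¬ ((o : Nat) : Int) = -1 by omega)]
    rw [pvFindLoop_eq data key data.toList key.toList rfl rfl hK (data.toList.length + 1) o _]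
    -- the chain after the first occurrence, in canonical-fuel form
    rw [pvChain_irrel data.toList key.toList hK (data.toList.length + 1)
      (data.toList.length + 1 - (o + key.toList.length)) (o + key.toList.length)
      (by omega) (by omega)]
    -- B's chain from 0 starts with o
    rw [pvChain_succ]
    simp only [ho]
    rw [if_neg (show ¬ ((o : Nat) : Int) = -1 by omega), Int.toNat_natCast]
    rw [pvChain_irrel data.toList key.toList hK (data.toList.length)
      (data.toList.length + 1 - (o + key.toList.length)) (o + key.toList.length)
      (by omega) (by omega)]
    set chN := pvChain data.toList key.toList
      (data.toList.length + 1 - (o + key.toList.length)) (o + key.toList.length) with hchN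
    set g := pvCountNesting data ((0 : Nat) : Int) ((o : Nat) : Int) with hg
    -- B's annotated chain = shift of A's cumulative list by g
    simp only [pvAnnB, List.foldl_cons]
    rw [pvAnnB_eq_cum data key.toList.length chN o (0 + g)]
    have hshift : pvCum (0 + g) (pvRaw data key.toList.length o chN)
        = (pvCum 0 (pvRaw data key.toList.length o chN)).map (fun x => (x.1, x.2 + g)) :=
      pvCum_shift g _ 0
    rw [hshift]
    have hbest0 : pvBest (-1, 0) ((o : Int), 0 + g) = ((o : Int), 0 + g) := by
      simp [pvBest]
    rw [hbest0]
    cases hchn : chN with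
    | nil =>
      -- single occurrence: A early-exits with o, B's fold is just the head
      simp only [pvRaw, pvCum, List.map_nil, List.foldl_nil]
      rw [List.append_nil]
      rw [if_pos (by simp)]
      rw [show (0 : Int) = ((0 : Nat) : Int) by simp, PySem.List.pyGetD_natCast]
      rfl
    | cons c0 rest =>
      -- several occurrences: A prefix-sums and takes min; B's fold is that min, shifted
      rw [← hchn]
      have hraw : pvRaw data key.toList.length o chN
          = ((c0 : Int), pvCountNesting data ((o + key.toList.length : Nat) : Int) (c0 : Int))
            :: pvRaw data key.toList.length c0 rest := by rw [hchn]; rfl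
      have hlen1 : ¬ (([((o : Int), (0 : Int))] ++ pvRaw data key.toList.length o chN).length = 1) := by
        rw [hraw]; simp
      rw [if_neg hlen1]
      -- the in-place prefix-sum loop
      have hcum := pvCumLoop_eq (pvRaw data key.toList.length o chN)
        [((o : Int), (0 : Int))] ((o : Int), (0 : Int)) rfl
      simp only [List.length_singleton, Nat.cast_one] at hcum
      rw [show ((([(((o : Nat) : Int), (0 : Int))] : List (Int × Int))
            ++ pvRaw data key.toList.length o chN).length : Int)
          = 1 + ((pvRaw data key.toList.length o chN).length : Int) by
        simp; omega]
      rw [hcum]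
      -- compare the two min computations
      have hA := pvBest_eq_min (pvCum 0 (pvRaw data key.toList.length o chN)) ((o : Int), 0)
        (by simp) (fun x hx => pvCumRaw_fst_nonneg data key.toList.length chN o 0 x hx)
      have hB := pvBest_eq_min
        ((pvCum 0 (pvRaw data key.toList.length o chN)).map (fun x => (x.1, x.2 + g)))
        ((o : Int), 0 + g)
        (by simp)
        (by
          intro x hx
          simp only [List.mem_map] at hx
          obtain ⟨y, hy, rfl⟩ := hx
          exact pvCumRaw_fst_nonneg data key.toList.length chN o 0 y hy)
      have hmap : (((o : Int), (0 : Int)) :: pvCum 0 (pvRaw data key.toList.length o chN)).map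
            (fun x => (x.1, x.2 + g))
          = ((o : Int), 0 + g)
            :: (pvCum 0 (pvRaw data key.toList.length o chN)).map (fun x => (x.1, x.2 + g)) := by
        simp
      have hshift2 := pvMin_shift g (((o : Int), (0 : Int)) :: pvCum 0 (pvRaw data key.toList.length o chN))
      rw [hmap, hB, hA] at hshift2
      simp only [Option.map_some, Option.some.injEq] at hshift2
      rw [List.singleton_append, hA]
      rw [hshift2]
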